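-- pv_equiv track=rewrite | github.com/bguttel/M1-Internship | jobfile_generator.py | find_unused_name
-- ===== SOURCE A (Python) =====
-- def find_unused_name(name, list_names, extension='.npj'):
--     """
--     name with a given extension
--     """
--     l = len(extension)
--     if extension not in name:
--         name += extension
--
--     only_name = name[:-l]
--
--     i = 0
--     new_name = only_name + '_' + str(i) + extension
--     while new_name in list_names:
--         new_name = only_name + '_' + str(i) + extension
--         i+=1
--
--     return new_name
-- ===== SOURCE B (Python) =====
-- def find_unused_name(name, list_names, extension='.npj'):
--     if extension not in name:
--         name += extension
--     prefix = name[:-len(extension)] + '_'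
--     used = set()
--     for s in list_names:
--         if (s.startswith(prefix) and s.endswith(extension)
--                 and len(s) >= len(prefix) + len(extension)):
--             used.add(s[len(prefix):len(s) - len(extension)])
--     i = 0
--     while str(i) in used:
--         i += 1
--     return prefix + str(i) + extension
-- ===== Notes on version B (the rewrite author's own statement) =====
-- stated objective: alternative
-- what changed: B scans list_names once, collecting into a set the middle substrings of names shaped like base_<mid><extension>, then counts i upward until str(i) is not in that set, instead of A's loop that rebuilds a candidate name and rescans the whole list for every index; it trades a per-candidate list rescan for a one-pass index set.
import Mathlib
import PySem

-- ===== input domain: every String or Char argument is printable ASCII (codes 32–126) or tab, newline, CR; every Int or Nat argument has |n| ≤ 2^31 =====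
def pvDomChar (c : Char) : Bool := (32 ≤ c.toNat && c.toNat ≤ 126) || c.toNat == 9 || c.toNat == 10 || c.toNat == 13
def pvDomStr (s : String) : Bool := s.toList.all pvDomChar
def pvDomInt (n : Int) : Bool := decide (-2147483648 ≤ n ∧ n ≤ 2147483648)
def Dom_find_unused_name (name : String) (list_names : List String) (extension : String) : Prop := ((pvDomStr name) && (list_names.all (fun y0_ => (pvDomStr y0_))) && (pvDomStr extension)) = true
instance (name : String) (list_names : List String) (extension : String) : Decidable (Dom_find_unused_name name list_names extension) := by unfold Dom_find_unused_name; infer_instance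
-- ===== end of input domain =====

-- B replaces A's per-candidate rescan of list_names by ONE pass collecting the used middle
-- substrings into a set, then counts i up until str(i) is unused (objective: alternative).

-- ===== PORT A =====
-- fuel for A's while loop (totality guard only): an index whose decimal form is longer than
-- every string in the list is surely unused, so 10^(maxlen+1)+2 iterations always suffice.
def pvMaxLen (L : List String) : Nat := L.foldl (fun m s => max m s.toList.length) 0

def pvFuel (L : List String) : Nat := 10 ^ (pvMaxLen L + 1) + 2

-- the while loop: state (new_name, i); body recomputes new_name from the CURRENT i, then i += 1
def pvLoopA (L : List String) (base ext nn : String) (i : Int) : Nat → String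
  | 0 => nn
  | fuel+1 =>
    if L.contains nn then
      pvLoopA L base ext (base ++ "_" ++ PySem.Int.toStr i ++ ext) (i + 1) fuel
    else nn

def find_unused_name (name : String) (list_names : List String) (extension : String) : String :=
  let l : Int := PySem.Str.len extension
  let name1 := if PySem.Str.isIn extension name = false then name ++ extension else name
  let only_name := PySem.Str.slice name1 none (some (-l))
  let i : Int := 0
  let new_name := only_name ++ "_" ++ PySem.Int.toStr i ++ extension
  pvLoopA list_names only_name extension new_name i (pvFuel list_names)

-- ===== PORT B =====
-- one pass over list_names: collect the middle substring of every name shaped p ++ mid ++ ext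
def pvCollect (p ext : String) (L : List String) : PySem.Set String :=
  L.foldl
    (fun used s =>
      if PySem.Str.startswith s p && PySem.Str.endswith s ext
         && decide (PySem.Str.len p + PySem.Str.len ext ≤ PySem.Str.len s) then
        PySem.Set.add used
          (PySem.Str.slice s (some (PySem.Str.len p)) (some (PySem.Str.len s - PySem.Str.len ext)))
      else used)
    PySem.Set.empty

-- Source B's while loop (fuel is a totality guard, justified as for A from the collected set)
def pvLoopB (used : PySem.Set String) (i : Int) : Nat → Int
  | 0 => i
  | fuel+1 =>
    if PySem.Set.contains used (PySem.Int.toStr i) then pvLoopB used (i + 1) fuel else i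

def find_unused_name_alt (name : String) (list_names : List String) (extension : String) : String :=
  let name1 := if PySem.Str.isIn extension name = false then name ++ extension else name
  let pfx := PySem.Str.slice name1 none (some (-(PySem.Str.len extension))) ++ "_"
  let used := pvCollect pfx extension list_names
  let i := pvLoopB used 0 (pvFuel used)
  pfx ++ PySem.Int.toStr i ++ extension

-- ===== PRECONDITION & SPEC =====
def Spec_find_unused_name (name : String) (list_names : List String) (extension : String) (out : String) : Prop := out = find_unused_name_alt name list_names extension
instance (name : String) (list_names : List String) (extension : String) (out : String) : Decidable (Spec_find_unused_name name list_names extension out) := by unfold Spec_find_unused_name; infer_instance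

-- ===== CLAIM (what is proved, stated in full; the proofs are below) =====
def Claim_equal_find_unused_name : Prop := ∀ (name : String) (list_names : List String) (extension : String), Dom_find_unused_name name list_names extension → Spec_find_unused_name name list_names extension (find_unused_name name list_names extension)

-- ===== LEMMAS AND PROOFS =====

-- candidate with prefix p (= only_name ++ "_") and index k
def pvCand (p e : String) (k : Nat) : String := p ++ PySem.Int.toStr (k : Int) ++ e

-- the parse condition and middle slice used by pvCollect
def pvCond (p e s : String) : Bool :=
  PySem.Str.startswith s p && PySem.Str.endswith s e
    && decide (PySem.Str.len p + PySem.Str.len e ≤ PySem.Str.len s)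

def pvMid (p e s : String) : String :=
  PySem.Str.slice s (some (PySem.Str.len p)) (some (PySem.Str.len s - PySem.Str.len e))

lemma pvFoldl_max_mono (L : List String) (m : Nat) :
    m ≤ L.foldl (fun m s => max m s.toList.length) m := by
  induction L generalizing m with
  | nil => simp
  | cons a t ih => exact le_trans (le_max_left _ _) (ih _)

lemma pvMaxLen_aux (L : List String) (s : String) (h : s ∈ L) (m : Nat) :
    s.toList.length ≤ L.foldl (fun m s => max m s.toList.length) m := by
  induction L generalizing m with
  | nil => simp at h
  | cons a t ih =>
    rcases List.mem_cons.mp h with h | h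
    · subst h
      exact le_trans (le_max_right m _) (pvFoldl_max_mono t _)
    · exact ih h _

lemma pvMaxLen_mem {L : List String} {s : String} (h : s ∈ L) : s.toList.length ≤ pvMaxLen L := by
  unfold pvMaxLen; exact pvMaxLen_aux L s h 0

lemma pvLen_toStr_pow (M : Nat) :
    M + 2 ≤ (PySem.Int.toStr ((10 ^ (M + 1) : Nat) : Int)).toList.length := by
  rw [PySem.Int.toList_toStr]
  unfold PySem.Int.toChars
  rw [if_neg (Int.not_lt.mpr (by positivity))]
  have h10 : (1 : Nat) < 10 := by norm_num
  have hiff := Nat.length_toDigits_le_iff (n := ((10 ^ (M + 1) : Nat) : Int).toNat) (k := M + 1) h10 (by omega)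
  have h2 : ¬ ((10 : Nat).toDigits (((10 ^ (M + 1) : Nat) : Int)).toNat).length ≤ M + 1 := by
    rw [hiff]; simp
  omega

lemma pvCand_toList (p e : String) (k : Nat) :
    (pvCand p e k).toList = p.toList ++ (PySem.Int.toStr (k : Int)).toList ++ e.toList := by
  simp [pvCand]

lemma pvCond_append (p e x : String) : pvCond p e (p ++ x ++ e) = true := by
  simp only [pvCond, Bool.and_eq_true, decide_eq_true_eq,
    PySem.Str.startswith_eq, PySem.Str.endswith_eq, PySem.Str.len_eq]
  refine ⟨⟨?_, ?_⟩, ?_⟩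
  · rw [PySem.Chars.startswith_iff]
    simp [List.prefix_append]
  · rw [PySem.Chars.endswith_iff]
    exact ⟨(p ++ x).toList, by simp⟩
  · simp

lemma pvMid_append (p e x : String) : pvMid p e (p ++ x ++ e) = x := by
  apply String.toList_inj.mp
  simp only [pvMid, PySem.Str.toList_slice, PySem.Str.len_eq, PySem.Chars.slice_eq_listSlice,
    String.toList_append]
  have hb : ((p.toList ++ x.toList ++ e.toList).length : Int) - (e.toList.length : Int)
      = ((p.toList.length + x.toList.length : Nat) : Int) := by simp; ring
  rw [hb, PySem.List.slice_natCast]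
  rw [List.append_assoc, List.drop_left, Nat.add_sub_cancel_left, List.take_left]

lemma pvDecomp {p e s : String} (h : pvCond p e s = true) : s = p ++ pvMid p e s ++ e := by
  simp only [pvCond, Bool.and_eq_true, decide_eq_true_eq,
    PySem.Str.startswith_eq, PySem.Str.endswith_eq, PySem.Str.len_eq,
    PySem.Chars.startswith_iff, PySem.Chars.endswith_iff] at h
  obtain ⟨⟨⟨t, ht⟩, ⟨u, hu⟩⟩, hlenI⟩ := h
  have hlen : p.toList.length + e.toList.length ≤ s.toList.length := by exact_mod_cast hlenI
  apply String.toList_inj.mp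
  simp only [String.toList_append, pvMid, PySem.Str.toList_slice, PySem.Str.len_eq,
    PySem.Chars.slice_eq_listSlice]
  have hle : e.toList.length ≤ s.toList.length := by omega
  have hb : (s.toList.length : Int) - (e.toList.length : Int)
      = ((s.toList.length - e.toList.length : Nat) : Int) := (Nat.cast_sub hle).symm
  rw [hb, PySem.List.slice_natCast]
  have hu' : s.toList.length - e.toList.length = u.length := by
    have := congrArg List.length hu; rw [List.length_append] at this; omega
  have htake : s.toList.take p.toList.length = p.toList := by
    rw [← ht]; exact List.take_left
  have hdrop : s.toList.drop (s.toList.length - e.toList.length) = e.toList := by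
    rw [hu', ← hu]; exact List.drop_left
  conv_lhs => rw [← List.take_append_drop (s.toList.length - e.toList.length) s.toList]
  rw [hdrop]
  conv_lhs => rw [← List.take_append_drop p.toList.length (s.toList.take (s.toList.length - e.toList.length))]
  rw [List.take_take, min_eq_left (by omega), htake, List.drop_take]

lemma pvMem_foldl (L : List String) (c : String → Bool) (m : String → String)
    (u0 : PySem.Set String) (x : String) :
    x ∈ L.foldl (fun u s => if c s then PySem.Set.add u (m s) else u) u0 ↔
      x ∈ u0 ∨ ∃ s ∈ L, c s = true ∧ m s = x := by
  induction L generalizing u0 with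
  | nil => simp
  | cons a t ih =>
    simp only [List.foldl_cons, ih, List.mem_cons]
    by_cases h : c a
    · rw [if_pos h, PySem.Set.mem_add]
      constructor
      · rintro (⟨hx | hx⟩ | ⟨s, hs, hcs, hms⟩)
        · exact Or.inl hx
        · exact Or.inr ⟨a, Or.inl rfl, h, hx.symm⟩
        · exact Or.inr ⟨s, Or.inr hs, hcs, hms⟩
      · rintro (hx | ⟨s, (rfl | hs), hcs, hms⟩)
        · exact Or.inl (Or.inl hx)
        · exact Or.inl (Or.inr hms.symm)
        · exact Or.inr ⟨s, hs, hcs, hms⟩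
    · rw [if_neg h]
      constructor
      · rintro (hx | ⟨s, hs, hcs, hms⟩)
        · exact Or.inl hx
        · exact Or.inr ⟨s, Or.inr hs, hcs, hms⟩
      · rintro (hx | ⟨s, (rfl | hs), hcs, hms⟩)
        · exact Or.inl hx
        · exact absurd hcs (by simp [h])
        · exact Or.inr ⟨s, hs, hcs, hms⟩

lemma pvCollect_eq (p e : String) (L : List String) :
    pvCollect p e L
      = L.foldl (fun u s => if pvCond p e s then PySem.Set.add u (pvMid p e s) else u)
          PySem.Set.empty := rfl

lemma pvContains_collect (p e : String) (L : List String) (k : Nat) :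
    PySem.Set.contains (pvCollect p e L) (PySem.Int.toStr (k : Int)) = true ↔ pvCand p e k ∈ L := by
  rw [PySem.Set.contains_iff, pvCollect_eq, pvMem_foldl]
  constructor
  · rintro (hx | ⟨s, hs, hcs, hms⟩)
    · simp [PySem.Set.empty] at hx
    · have := pvDecomp hcs
      rw [hms] at this
      rw [show pvCand p e k = p ++ PySem.Int.toStr (k : Int) ++ e from rfl, ← this]
      exact hs
  · intro hmem
    refine Or.inr ⟨pvCand p e k, hmem, ?_, ?_⟩
    · exact pvCond_append p e _
    · exact pvMid_append p e _

lemma pvCand_free (p e : String) (L : List String) :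
    pvCand p e (10 ^ (pvMaxLen L + 1)) ∉ L := by
  intro hmem
  have h1 := pvMaxLen_mem hmem
  have h2 := pvLen_toStr_pow (pvMaxLen L)
  have h3 := congrArg List.length (pvCand_toList p e (10 ^ (pvMaxLen L + 1)))
  simp only [List.length_append] at h3
  omega

lemma pvCand_succ (b e : String) (j : Nat) :
    b ++ "_" ++ PySem.Int.toStr ((j : Int) + 1) ++ e = pvCand (b ++ "_") e (j + 1) := by
  unfold pvCand
  have : ((j : Int) + 1) = (((j + 1 : Nat)) : Int) := by push_cast; ring
  rw [this, String.append_assoc]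

lemma pvLoopA_eq (L : List String) (b e : String) (hP : ∃ k, pvCand (b ++ "_") e k ∉ L) :
    ∀ (fuel j : Nat), (∀ m < j, pvCand (b ++ "_") e m ∈ L) → Nat.find hP < fuel + j →
      pvLoopA L b e (pvCand (b ++ "_") e j) ((j : Int) + 1) fuel
        = pvCand (b ++ "_") e (Nat.find hP) := by
  intro fuel
  induction fuel with
  | zero =>
    intro j hinv hlt
    exact absurd (Nat.find_spec hP) (by simp; exact hinv _ (by omega))
  | succ fuel ih =>
    intro j hinv hlt
    show (if L.contains (pvCand (b ++ "_") e j) then _ else _) = _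
    by_cases hmem : pvCand (b ++ "_") e j ∈ L
    · rw [if_pos (List.contains_iff_mem.mpr hmem)]
      rw [pvCand_succ]
      have hcast : ((j : Int) + 1 + 1) = (((j + 1 : Nat) : Int) + 1) := by push_cast; ring
      rw [hcast]
      apply ih (j + 1)
      · intro m hm
        rcases Nat.lt_succ_iff_lt_or_eq.mp hm with h | h
        · exact hinv m h
        · subst h; exact hmem
      · omega
    · rw [if_neg (by simp [hmem])]
      have h1 : Nat.find hP ≤ j := Nat.find_le hmem
      have h2 : ¬ Nat.find hP < j := fun hc => (Nat.find_spec hP) (hinv _ hc) |>.elim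
      have : j = Nat.find hP := by omega
      rw [this]

lemma pvLoopB_eq (used : PySem.Set String)
    (hQ : ∃ k : Nat, PySem.Set.contains used (PySem.Int.toStr (k : Int)) = false) :
    ∀ (fuel j : Nat), (∀ m < j, PySem.Set.contains used (PySem.Int.toStr (m : Int)) = true) →
      Nat.find hQ < fuel + j →
      pvLoopB used (j : Int) fuel = ((Nat.find hQ : Nat) : Int) := by
  intro fuel
  induction fuel with
  | zero =>
    intro j hinv hlt
    have := Nat.find_spec hQ
    rw [hinv _ (by omega)] at this
    exact absurd this (by simp)
  | succ fuel ih =>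
    intro j hinv hlt
    show (if PySem.Set.contains used (PySem.Int.toStr (j : Int)) then
        pvLoopB used ((j : Int) + 1) fuel else (j : Int)) = _
    by_cases hc : PySem.Set.contains used (PySem.Int.toStr (j : Int)) = true
    · rw [if_pos hc]
      have hcast : ((j : Int) + 1) = (((j + 1 : Nat)) : Int) := by push_cast; ring
      rw [hcast]
      apply ih (j + 1)
      · intro m hm
        rcases Nat.lt_succ_iff_lt_or_eq.mp hm with h | h
        · exact hinv m h
        · subst h; exact hc
      · omega
    · rw [if_neg hc]
      have h1 : Nat.find hQ ≤ j := Nat.find_le (by simpa using hc)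
      have h2 : ¬ Nat.find hQ < j := fun hcc => by
        have := hinv _ hcc
        rw [Nat.find_spec hQ] at this
        exact absurd this (by simp)
      have : j = Nat.find hQ := by omega
      rw [this]

lemma pvCand_zero (b e : String) :
    b ++ "_" ++ PySem.Int.toStr 0 ++ e = pvCand (b ++ "_") e 0 := by
  unfold pvCand
  norm_num [String.append_assoc]

lemma pvA_eq (L : List String) (b e : String) (hP : ∃ k, pvCand (b ++ "_") e k ∉ L)
    (hfind : Nat.find hP < 10 ^ (pvMaxLen L + 1) + 1) :
    pvLoopA L b e (pvCand (b ++ "_") e 0) 0 (pvFuel L) = pvCand (b ++ "_") e (Nat.find hP) := by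
  rw [show pvFuel L = (10 ^ (pvMaxLen L + 1) + 1) + 1 from rfl]
  show (if L.contains (pvCand (b ++ "_") e 0) then _ else _) = _
  by_cases hmem : pvCand (b ++ "_") e 0 ∈ L
  · rw [if_pos (List.contains_iff_mem.mpr hmem)]
    rw [pvCand_zero, show (0 : Int) + 1 = ((0 : Nat) : Int) + 1 by norm_num]
    apply pvLoopA_eq L b e hP _ 0
    · intro m hm; omega
    · omega
  · rw [if_neg (by simp [hmem])]
    have : Nat.find hP = 0 := by
      have h1 : Nat.find hP ≤ 0 := Nat.find_le hmem
      omega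
    rw [this]

-- ===== VERDICT (by name: the statement is the Claim_ definition above) =====
theorem find_unused_name_spec : Claim_equal_find_unused_name := by
  intro name L ext _
  unfold Spec_find_unused_name find_unused_name find_unused_name_alt
  dsimp only
  set on := PySem.Str.slice (if PySem.Str.isIn ext name = false then name ++ ext else name) none
      (some (-(PySem.Str.len ext))) with hon
  set p := on ++ "_" with hp
  set used := pvCollect p ext L with hused
  have hP : ∃ k, pvCand p ext k ∉ L := ⟨10 ^ (pvMaxLen L + 1), pvCand_free p ext L⟩
  have hQ : ∃ k : Nat, PySem.Set.contains used (PySem.Int.toStr (k : Int)) = false := by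
    refine ⟨10 ^ (pvMaxLen L + 1), ?_⟩
    rw [Bool.eq_false_iff]
    intro hc
    exact pvCand_free p ext L ((pvContains_collect p ext L _).mp hc)
  -- A side
  rw [pvCand_zero, pvA_eq L on ext hP (by
    have := Nat.find_le (h := hP) (pvCand_free p ext L)
    omega)]
  -- B side
  have hQfree : PySem.Set.contains used (PySem.Int.toStr ((10 ^ (pvMaxLen used + 1) : Nat) : Int)) = false := by
    rw [Bool.eq_false_iff]
    intro hc
    have hmem := PySem.Set.contains_iff used _ |>.mp hc
    have h1 := pvMaxLen_mem hmem
    have h2 := pvLen_toStr_pow (pvMaxLen used)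
    omega
  have hBloop : pvLoopB used 0 (pvFuel used) = ((Nat.find hQ : Nat) : Int) := by
    rw [show (0 : Int) = ((0 : Nat) : Int) by norm_num]
    apply pvLoopB_eq used hQ (pvFuel used) 0
    · intro m hm; omega
    · have := Nat.find_le (h := hQ) hQfree
      unfold pvFuel
      omega
  rw [hBloop]
  -- the two least indices coincide
  have hfind : Nat.find hQ = Nat.find hP := by
    apply le_antisymm
    · apply Nat.find_le
      rw [Bool.eq_false_iff]
      intro hc
      exact Nat.find_spec hP ((pvContains_collect p ext L _).mp hc)
    · apply Nat.find_le
      intro hmem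
      have := (pvContains_collect p ext L _).mpr hmem
      rw [Nat.find_spec hQ] at this
      exact absurd this (by simp)
  rw [hfind]
  rfl
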